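-- pv_equiv track=rewrite | github.com/Vanchnav/blom_scheme | blom/functions.py | CVal
-- ===== SOURCE A (Python) =====
-- def CVal(R,r,sv):
--     #print "Вычисление слагаемых коэффициентов полиномов F(r_i,X_2,...,X_k), i=1,...,n, n участников и самих этих коэффициентов суммированием слагаемых (имя списка r)"
--     cval=[]
--     for i in range (0,int(len(R))):
--         for s in range (0,int(len(r))):
--             cvalraw=[R[i][0]]
--             for j in range (0,m+1):
--                 cvalraw.append((r[s][j]*sv[R[i][1+j]])%p)
--             cval.append(cvalraw)
--     tt=[]
--     for s in range (0,int(len(cval))):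
--             g=0
--             for j in range(0,m+1):
--                 g=(g+cval[s][j+1])%p
--             tt.append(g)
--     return (cval,tt)
--
-- p = 127
--
-- m = 3
-- ===== SOURCE B (Python) =====
-- p = 127
--
-- m = 3
--
-- def CVal(R, r, sv):
--     # Fused single pass: build each row and its modular sum together,
--     # iterating directly over the rows instead of index ranges.
--     cval = []
--     tt = []
--     for Ri in R:
--         for rs in r:
--             row = [Ri[0]]
--             g = 0
--             for j in range(m + 1):
--                 t = (rs[j] * sv[Ri[1 + j]]) % p
--                 row.append(t)
--                 g = (g + t) % p
--             cval.append(row)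
--             tt.append(g)
--     return (cval, tt)
-- ===== Notes on version B (the rewrite author's own statement) =====
-- stated objective: simpler
-- what changed: Fuses A's two passes into one: each row's modular sum is accumulated while the row is built, iterating directly over the rows instead of index ranges, eliminating the second pass that re-scans cval.
import Mathlib
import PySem

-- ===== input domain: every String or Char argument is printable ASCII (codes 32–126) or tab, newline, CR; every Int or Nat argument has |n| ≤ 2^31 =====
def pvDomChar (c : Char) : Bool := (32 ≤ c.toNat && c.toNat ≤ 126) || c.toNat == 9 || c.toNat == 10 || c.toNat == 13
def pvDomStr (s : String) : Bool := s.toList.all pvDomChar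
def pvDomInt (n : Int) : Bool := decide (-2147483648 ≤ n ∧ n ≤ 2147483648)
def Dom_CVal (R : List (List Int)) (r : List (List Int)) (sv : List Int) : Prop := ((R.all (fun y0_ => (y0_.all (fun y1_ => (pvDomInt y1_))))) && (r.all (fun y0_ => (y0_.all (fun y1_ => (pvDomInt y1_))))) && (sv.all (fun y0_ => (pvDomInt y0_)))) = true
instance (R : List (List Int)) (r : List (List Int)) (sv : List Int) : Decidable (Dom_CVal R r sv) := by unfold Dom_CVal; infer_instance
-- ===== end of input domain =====

-- B fuses A's two passes into one, accumulating each row's modular sum while the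
-- row is built and iterating over the rows themselves instead of index ranges.

def pvP : Int := 127
def pvM : Nat := 3

-- ===== PORT A =====
-- literal transliteration of A: nested index loops build cval, then a second
-- index loop over cval computes the modular row sums tt.
-- R[i]/r[s]/cval[s] with indices from range(0,len(..)) are always in range, so
-- List.getD is exact there; inner accesses are guarded by Pre_CVal below.
def CVal (R : List (List Int)) (r : List (List Int)) (sv : List Int) : List (List Int) × List Int :=
  let cval := (List.range R.length).foldl (fun cval i =>
    (List.range r.length).foldl (fun cval s =>
      let cvalraw := (List.range (pvM + 1)).foldl (fun acc j =>
        acc ++ [PySem.Int.mod ((r.getD s []).getD j 0 *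
          ((PySem.List.pyGet? sv ((R.getD i []).getD (1 + j) 0)).getD 0)) pvP])
        [(R.getD i []).getD 0 0]
      cval ++ [cvalraw]) cval) []
  let tt := (List.range cval.length).foldl (fun tt s =>
    let g := (List.range (pvM + 1)).foldl (fun g j =>
      PySem.Int.mod (g + (cval.getD s []).getD (j + 1) 0) pvP) 0
    tt ++ [g]) []
  (cval, tt)

-- ===== PORT B =====
-- single fused pass over the rows: the row and its running sum grow together.
def CVal_alt (R : List (List Int)) (r : List (List Int)) (sv : List Int) : List (List Int) × List Int :=
  R.foldl (fun acc Ri =>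
    r.foldl (fun acc2 rs =>
      let st := (List.range (pvM + 1)).foldl (fun (st : List Int × Int) j =>
        let t := PySem.Int.mod (rs.getD j 0 *
          ((PySem.List.pyGet? sv (Ri.getD (1 + j) 0)).getD 0)) pvP
        (st.1 ++ [t], PySem.Int.mod (st.2 + t) pvP)) ([Ri.getD 0 0], 0)
      (acc2.1 ++ [st.1], acc2.2 ++ [st.2])) acc) ([], [])

-- ===== PRECONDITION & SPEC =====
-- Pre_CVal: exactly the inputs on which A raises no IndexError — when both R and
-- r are nonempty, every row of R needs indices 0..m+1 and every R-row entry used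
-- as an sv index must be a valid Python index of sv; every row of r needs
-- indices 0..m.  (If R or r is empty no element access happens at all.)
def Pre_CVal (R : List (List Int)) (r : List (List Int)) (sv : List Int) : Prop :=
  R = [] ∨ r = [] ∨
    ((∀ row ∈ R, 5 ≤ row.length ∧
        ∀ j ∈ List.range 4, PySem.Raise.InRange sv.length (row.getD (1 + j) 0)) ∧
     (∀ row ∈ r, 4 ≤ row.length))
instance (R : List (List Int)) (r : List (List Int)) (sv : List Int) : Decidable (Pre_CVal R r sv) := by unfold Pre_CVal; infer_instance

def pvWitness_CVal : List (List Int) × List (List Int) × List Int :=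
  ([[5, 0, 1, 0, 1]], [[1, 2, 3, 4], [5, 6, 7, 8]], [10, 20])

def Spec_CVal (R : List (List Int)) (r : List (List Int)) (sv : List Int) (out : List (List Int) × List Int) : Prop := out = CVal_alt R r sv
instance (R : List (List Int)) (r : List (List Int)) (sv : List Int) (out : List (List Int) × List Int) : Decidable (Spec_CVal R r sv out) := by unfold Spec_CVal; infer_instance

-- ===== CLAIM (what is proved, stated in full; the proofs are below) =====
def Claim_equal_CVal : Prop := ∀ (R : List (List Int)) (r : List (List Int)) (sv : List Int), Dom_CVal R r sv → Pre_CVal R r sv → Spec_CVal R r sv (CVal R r sv)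

-- ===== LEMMAS AND PROOFS =====

-- generic: foldl over the index range with getD = foldl over the list itself
theorem pv_foldl_range_getD {α β : Type} (f : β → α → β) (d : α) :
    ∀ (xs : List α) (init : β),
      (List.range xs.length).foldl (fun acc i => f acc (xs.getD i d)) init
        = xs.foldl f init := by
  intro xs
  induction xs with
  | nil => intro init; rfl
  | cons x t ih =>
    intro init
    simp only [List.length_cons, List.range_succ_eq_map, List.foldl_cons, List.foldl_map]
    simpa using ih (f init x)

-- generic: appending one element per step is map
theorem pv_foldl_append_map {α β : Type} (t : α → β) :
    ∀ (l : List α) (init : List β),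
      l.foldl (fun acc x => acc ++ [t x]) init = init ++ l.map t := by
  intro l
  induction l with
  | nil => intro init; simp
  | cons x xs ih => intro init; simp [ih]

-- congruence for foldl under pointwise-equal step functions
theorem pv_foldl_congr {α β : Type} {f g : β → α → β} (h : ∀ a x, f a x = g a x)
    (l : List α) (init : β) : l.foldl f init = l.foldl g init := by
  have : f = g := funext fun a => funext fun x => h a x
  rw [this]

-- the term produced at position j of a row
def pvT (Ri rs sv : List Int) (j : Nat) : Int :=
  PySem.Int.mod (rs.getD j 0 * ((PySem.List.pyGet? sv (Ri.getD (1 + j) 0)).getD 0)) pvP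

-- the row A builds for (Ri, rs)
def pvRow (Ri rs sv : List Int) : List Int :=
  Ri.getD 0 0 :: (List.range (pvM + 1)).map (pvT Ri rs sv)

-- A's second-pass modular sum of a row
def pvG (row : List Int) : Int :=
  (List.range (pvM + 1)).foldl (fun g j => PySem.Int.mod (g + row.getD (j + 1) 0) pvP) 0

-- A's inner row-building fold produces pvRow
theorem pv_rowA (Ri rs sv : List Int) :
    (List.range (pvM + 1)).foldl (fun acc j => acc ++ [pvT Ri rs sv j]) [Ri.getD 0 0]
      = pvRow Ri rs sv := by
  rw [pv_foldl_append_map]; rfl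

-- B's fused inner fold = (the row, its modular sum)
theorem pv_fused (Ri rs sv : List Int) :
    (List.range (pvM + 1)).foldl (fun (st : List Int × Int) j =>
        (st.1 ++ [pvT Ri rs sv j], PySem.Int.mod (st.2 + pvT Ri rs sv j) pvP))
      ([Ri.getD 0 0], 0)
      = (pvRow Ri rs sv, pvG (pvRow Ri rs sv)) := by
  show _ = (pvRow Ri rs sv, pvG (pvRow Ri rs sv))
  simp only [pvM, pvRow, pvG, List.range_succ, List.range_zero,
    List.foldl_cons, List.foldl_nil, List.map_cons, List.map_nil,
    List.nil_append, List.cons_append, List.getD, List.getElem?_cons_succ,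
    List.getElem?_cons_zero]
  rfl

-- a pair-fold whose second component mirrors pvG of the appended row keeps the
-- invariant snd = map pvG fst (single-list version)
theorem pv_pairFold1 {α : Type} (f : α → List Int) :
    ∀ (l : List α) (c : List (List Int)),
      l.foldl (fun acc x => (acc.1 ++ [f x], acc.2 ++ [pvG (f x)])) (c, c.map pvG)
        = (l.foldl (fun cc x => cc ++ [f x]) c,
           (l.foldl (fun cc x => cc ++ [f x]) c).map pvG) := by
  intro l
  induction l with
  | nil => intro c; rfl
  | cons x xs ih =>
    intro c
    simp only [List.foldl_cons]
    have : (c.map pvG) ++ [pvG (f x)] = (c ++ [f x]).map pvG := by simp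
    rw [show ((c, c.map pvG).1 ++ [f x], (c, c.map pvG).2 ++ [pvG (f x)])
          = (c ++ [f x], (c ++ [f x]).map pvG) by simp, ih]

-- nested (two-list) version of the invariant
theorem pv_pairFold2 {α β : Type} (f : α → β → List Int) (r : List β) :
    ∀ (l : List α) (c : List (List Int)),
      l.foldl (fun acc x =>
          r.foldl (fun acc2 y => (acc2.1 ++ [f x y], acc2.2 ++ [pvG (f x y)])) acc)
        (c, c.map pvG)
        = (l.foldl (fun cc x => r.foldl (fun cc2 y => cc2 ++ [f x y]) cc) c,
           (l.foldl (fun cc x => r.foldl (fun cc2 y => cc2 ++ [f x y]) cc) c).map pvG) := by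
  intro l
  induction l with
  | nil => intro c; rfl
  | cons x xs ih =>
    intro c
    simp only [List.foldl_cons]
    rw [pv_pairFold1 (f x) r c, ih]

theorem CVal_eq (R r : List (List Int)) (sv : List Int) :
    CVal R r sv = CVal_alt R r sv := by
  unfold CVal CVal_alt
  -- rewrite B's fused inner fold
  have hB : R.foldl (fun acc Ri =>
      r.foldl (fun acc2 rs =>
        let st := (List.range (pvM + 1)).foldl (fun (st : List Int × Int) j =>
          let t := PySem.Int.mod (rs.getD j 0 *
            ((PySem.List.pyGet? sv (Ri.getD (1 + j) 0)).getD 0)) pvP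
          (st.1 ++ [t], PySem.Int.mod (st.2 + t) pvP)) ([Ri.getD 0 0], 0)
        (acc2.1 ++ [st.1], acc2.2 ++ [st.2])) acc) (([], []) : List (List Int) × List Int)
      = R.foldl (fun acc Ri =>
          r.foldl (fun acc2 rs =>
            (acc2.1 ++ [pvRow Ri rs sv], acc2.2 ++ [pvG (pvRow Ri rs sv)])) acc)
          ([], []) := by
    apply pv_foldl_congr
    intro acc Ri
    apply pv_foldl_congr
    intro acc2 rs
    have := pv_fused Ri rs sv
    simp only [pvT] at this
    simp only [this]
  rw [hB]
  -- set C := the element-wise cval fold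
  set C := R.foldl (fun cc Ri => r.foldl (fun cc2 rs => cc2 ++ [pvRow Ri rs sv]) cc)
      ([] : List (List Int)) with hC
  have hB2 : R.foldl (fun acc Ri =>
      r.foldl (fun acc2 rs =>
        (acc2.1 ++ [pvRow Ri rs sv], acc2.2 ++ [pvG (pvRow Ri rs sv)])) acc)
      (([], []) : List (List Int) × List Int) = (C, C.map pvG) := by
    have := pv_pairFold2 (fun Ri rs => pvRow Ri rs sv) r R []
    simpa [hC] using this
  rw [hB2]
  -- A's side: outer/inner range folds = element folds, rows = pvRow
  have hA1 : (List.range R.length).foldl (fun cval i =>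
      (List.range r.length).foldl (fun cval s =>
        cval ++ [(List.range (pvM + 1)).foldl (fun acc j =>
          acc ++ [PySem.Int.mod ((r.getD s []).getD j 0 *
            ((PySem.List.pyGet? sv ((R.getD i []).getD (1 + j) 0)).getD 0)) pvP])
          [(R.getD i []).getD 0 0]]) cval) ([] : List (List Int)) = C := by
    rw [pv_foldl_range_getD (fun cval Ri =>
      (List.range r.length).foldl (fun cval s =>
        cval ++ [(List.range (pvM + 1)).foldl (fun acc j =>
          acc ++ [PySem.Int.mod ((r.getD s []).getD j 0 *
            ((PySem.List.pyGet? sv (Ri.getD (1 + j) 0)).getD 0)) pvP])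
          [Ri.getD 0 0]]) cval) ([] : List Int) R ([] : List (List Int))]
    rw [hC]
    apply pv_foldl_congr
    intro cc Ri
    rw [pv_foldl_range_getD (fun cc2 rs =>
      cc2 ++ [(List.range (pvM + 1)).foldl (fun acc j =>
        acc ++ [PySem.Int.mod (rs.getD j 0 *
          ((PySem.List.pyGet? sv (Ri.getD (1 + j) 0)).getD 0)) pvP])
        [Ri.getD 0 0]]) ([] : List Int) r cc]
    apply pv_foldl_congr
    intro cc2 rs
    rw [show (List.range (pvM + 1)).foldl (fun acc j =>
        acc ++ [PySem.Int.mod (rs.getD j 0 *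
          ((PySem.List.pyGet? sv (Ri.getD (1 + j) 0)).getD 0)) pvP])
        [Ri.getD 0 0] = pvRow Ri rs sv from pv_rowA Ri rs sv]
  simp only [hA1]
  -- A's tt pass: index fold over C computing pvG = map pvG
  have hA2 : (List.range C.length).foldl (fun tt s =>
      tt ++ [(List.range (pvM + 1)).foldl (fun g j =>
        PySem.Int.mod (g + (C.getD s []).getD (j + 1) 0) pvP) 0]) ([] : List Int)
      = C.map pvG := by
    rw [pv_foldl_range_getD (fun tt row =>
      tt ++ [(List.range (pvM + 1)).foldl (fun g j =>
        PySem.Int.mod (g + row.getD (j + 1) 0) pvP) 0]) ([] : List Int) C []]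
    exact pv_foldl_append_map pvG C []
  rw [hA2]

-- ===== VERDICT (by name: the statement is the Claim_ definition above) =====
theorem CVal_spec : Claim_equal_CVal := by
  intro R r sv _ _
  unfold Spec_CVal
  exact CVal_eq R r sv
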